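-- pv_equiv track=rewrite | github.com/Pierre-C-M-Laffont/How-Many-EVs-are-Needed-to-Reach-CO2-Emissions-Goals-A-Case-Study-from-Montreal-Canada | Résultats des traitements/Enquêtes OD et distances/2-modif_base_multimodale.py | sousseq
-- ===== SOURCE A (Python) =====
-- def sousseq(seq):
-- 	# coupe la liste de base selon les '17'
-- 	res = []
-- 	travail = seq
-- 	while '17' in travail:
-- 		i = travail.index('17')
-- 		res.append(travail[:i])
-- 		travail = travail[i+1:]
-- 	res.append(travail)
-- 	return res
-- ===== SOURCE B (Python) =====
-- def sousseq(seq):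
--     # one pass: accumulate the current segment, flush it on each '17'
--     res = []
--     cur = []
--     for x in seq:
--         if x == '17':
--             res.append(cur)
--             cur = []
--         else:
--             cur.append(x)
--     res.append(cur)
--     return res
-- ===== Notes on version B (the rewrite author's own statement) =====
-- stated objective: alternative
-- what changed: Replaces the repeated membership-test/index/slice passes over the shrinking tail with a single linear scan that accumulates the current segment and flushes it on '17'; it trades A's C-level slicing for one pure Python pass.
import Mathlib
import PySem

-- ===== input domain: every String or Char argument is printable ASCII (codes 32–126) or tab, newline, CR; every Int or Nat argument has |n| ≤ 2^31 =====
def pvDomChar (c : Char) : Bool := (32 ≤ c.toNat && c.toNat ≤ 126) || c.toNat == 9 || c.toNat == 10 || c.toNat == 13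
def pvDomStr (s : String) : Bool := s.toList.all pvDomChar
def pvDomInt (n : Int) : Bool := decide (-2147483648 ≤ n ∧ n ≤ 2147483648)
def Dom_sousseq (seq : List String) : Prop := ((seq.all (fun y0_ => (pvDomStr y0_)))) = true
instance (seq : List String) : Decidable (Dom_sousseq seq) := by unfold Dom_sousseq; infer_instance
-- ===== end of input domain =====

-- B replaces A's repeated index/slice passes over the shrinking tail by one linear
-- accumulating scan (objective: alternative single-pass decomposition).

-- ===== PORT A =====
-- the while loop: '17' ∈ travail ↔ index? travail "17" = some i; each iteration
-- appends travail[:i] and continues on travail[i+1:]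
def sousseqGo (res : List (List String)) (travail : List String) : List (List String) :=
  match h : PySem.List.index? travail "17" with
  | none => res ++ [travail]
  | some i =>
      sousseqGo (res ++ [PySem.List.slice travail none (some (i : Int))])
                (PySem.List.slice travail (some ((i : Int) + 1)) none)
termination_by travail.length
decreasing_by
  obtain ⟨hk, -, -⟩ := PySem.List.getElem_of_index?_eq_some h
  have hcast : ((i : Int) + 1) = (((i + 1 : Nat)) : Int) := by push_cast; ring
  rw [hcast, PySem.List.slice_from_natCast]
  simp
  omega

def sousseq (seq : List String) : List (List String) := sousseqGo [] seq

-- ===== PORT B =====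
def sousseqStep (st : List (List String) × List String) (x : String) :
    List (List String) × List String :=
  if x = "17" then (st.1 ++ [st.2], []) else (st.1, st.2 ++ [x])

def sousseq_alt (seq : List String) : List (List String) :=
  let st := seq.foldl sousseqStep ([], [])
  st.1 ++ [st.2]

-- ===== PRECONDITION & SPEC =====
def Spec_sousseq (seq : List String) (out : List (List String)) : Prop := out = sousseq_alt seq
instance (seq : List String) (out : List (List String)) : Decidable (Spec_sousseq seq out) := by unfold Spec_sousseq; infer_instance

-- ===== CLAIM (what is proved, stated in full; the proofs are below) =====
def Claim_equal_sousseq : Prop := ∀ (seq : List String), Dom_sousseq seq → Spec_sousseq seq (sousseq seq)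

-- ===== LEMMAS AND PROOFS =====

-- B's fold never flushes over a delimiter-free list: it just extends the current segment
theorem foldl_step_no17 (l : List String) (r : List (List String)) (c : List String)
    (h : "17" ∉ l) : l.foldl sousseqStep (r, c) = (r, c ++ l) := by
  induction l generalizing c with
  | nil => simp
  | cons x xs ih =>
      have hx : x ≠ "17" := by intro hx; exact h (by simp [hx])
      have hxs : "17" ∉ xs := fun hm => h (List.mem_cons_of_mem _ hm)
      simp [sousseqStep, hx, ih _ hxs]

-- main invariant: A's loop from state (res, travail) equals B's fold from (res, [])
theorem sousseqGo_eq (travail : List String) (res : List (List String)) :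
    sousseqGo res travail =
      (travail.foldl sousseqStep (res, [])).1 ++ [(travail.foldl sousseqStep (res, [])).2] := by
  induction hL : travail.length using Nat.strong_induction_on generalizing travail res with
  | _ n ih =>
    subst hL
    rw [sousseqGo]
    split
    next h =>
        have hnm : "17" ∉ travail := (PySem.List.index?_eq_none_iff _ _).mp h
        rw [foldl_step_no17 _ _ _ hnm]
        simp
    next i h =>
        obtain ⟨pre, suf, hsplit, hlen, hnm⟩ := (PySem.List.index?_eq_some_iff _ _ _).mp h
        have hto : PySem.List.slice travail none (some (i : Int)) = pre := by
          rw [PySem.List.slice_to_natCast, hsplit, ← hlen]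
          simp
        have hcast : ((i : Int) + 1) = (((i + 1 : Nat)) : Int) := by push_cast; ring
        have hfrom : PySem.List.slice travail (some ((i : Int) + 1)) none = suf := by
          rw [hcast, PySem.List.slice_from_natCast, hsplit, ← hlen]
          simp [List.drop_append]
        rw [hto, hfrom]
        have hshort : suf.length < travail.length := by
          rw [hsplit]; simp; omega
        rw [ih suf.length hshort suf (res ++ [pre]) rfl]
        rw [hsplit, List.foldl_append]
        rw [foldl_step_no17 _ _ _ hnm]
        simp [sousseqStep]

-- ===== VERDICT (by name: the statement is the Claim_ definition above) =====
theorem sousseq_spec : Claim_equal_sousseq := by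
  intro seq _
  unfold Spec_sousseq sousseq sousseq_alt
  exact sousseqGo_eq seq []
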